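-- pv_equiv track=rewrite | github.com/rookinc/hyperxi_lab | scripts/decagon_intersection_graph.py | build_shared_pairs
-- ===== SOURCE A (Python) =====
-- def build_shared_pairs(decagons: dict[int, list[int]]) -> dict[tuple[int, int], list[int]]:
--     keys = sorted(decagons)
--     sets = {k: set(v) for k, v in decagons.items()}
--     shared: dict[tuple[int, int], list[int]] = {}
--     for idx_i, i in enumerate(keys):
--         for j in keys[idx_i + 1:]:
--             inter = sorted(sets[i] & sets[j])
--             shared[(i, j)] = inter
--     return shared
-- ===== SOURCE B (Python) =====
-- def build_shared_pairs(decagons: dict[int, list[int]]) -> dict[tuple[int, int], list[int]]: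
--     keys = sorted(decagons)
--     # initialise every pair (in the same lexicographic insertion order) with an empty list
--     shared: dict[tuple[int, int], list[int]] = {}
--     for a, i in enumerate(keys):
--         for j in keys[a + 1:]:
--             shared[(i, j)] = []
--     # inverted index: element -> list of decagon keys containing it
--     index: dict[int, list[int]] = {}
--     for k, vs in decagons.items():
--         for v in set(vs):
--             index.setdefault(v, []).append(k)
--     # walk elements in increasing order, appending each to every pair of owners
--     for e in sorted(index):
--         ks = sorted(index[e])
--         for a, i in enumerate(ks):
--             for j in ks[a + 1:]:
--                 shared[(i, j)].append(e)
--     return shared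
-- ===== Notes on version B (the rewrite author's own statement) =====
-- stated objective: alternative
-- what changed: Replaces the per-pair set-intersection scan with an inverted index element->owning-keys: all pairs are initialised empty, then each element (in increasing order) is appended once to every pair of decagons that share it, so no intersection is ever recomputed; intended to be faster on sparse data, but the sandbox a timing run was too noisy to confirm a speed-up, so none is claimed.
import Mathlib
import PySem

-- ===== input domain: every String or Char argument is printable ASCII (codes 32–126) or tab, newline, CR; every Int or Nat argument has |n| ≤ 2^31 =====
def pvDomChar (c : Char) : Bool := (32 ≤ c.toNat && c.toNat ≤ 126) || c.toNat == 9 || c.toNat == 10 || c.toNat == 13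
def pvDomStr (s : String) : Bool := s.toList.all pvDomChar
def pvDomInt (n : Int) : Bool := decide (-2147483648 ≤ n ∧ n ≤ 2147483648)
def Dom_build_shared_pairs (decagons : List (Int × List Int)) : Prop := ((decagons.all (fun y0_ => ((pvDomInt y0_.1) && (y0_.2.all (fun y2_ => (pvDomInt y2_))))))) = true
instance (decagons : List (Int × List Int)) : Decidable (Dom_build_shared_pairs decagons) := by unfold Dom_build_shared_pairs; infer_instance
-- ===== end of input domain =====

-- B replaces A's per-pair set-intersection scan by an inverted index (element -> owning keys):
-- all pairs start empty and each element is appended once to every pair of decagons sharing it;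
-- same return value, proved equal below.


-- ===== PORT A =====
-- literal transliteration of A: sorted keys, per-key element sets, then for every pair
-- (i, j) with i < j in key order the sorted intersection sets[i] & sets[j].
-- (`sets[i]`/`sets[j]`: the key is always present — keys = sets.keys — so `getD _ []` is the total access.)
def build_shared_pairs (decagons : List (Int × List Int)) : List (Int × Int × List Int) :=
  let d := PySem.Dict.ofList decagons
  let keys := PySem.List.sorted d.keys (fun x => x) false
  let sets := d.items.foldl (fun s p => s.insert p.1 (PySem.Set.ofList p.2))
    (PySem.Dict.empty : PySem.Dict Int (PySem.Set Int))
  let shared := (PySem.List.enumerate keys).foldl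
    (fun sh p => (PySem.List.slice keys (some (p.1 + 1)) none).foldl
      (fun sh j => sh.insert (p.2, j)
        (PySem.List.sorted (PySem.Set.inter (sets.getD p.2 []) (sets.getD j [])) (fun x => x) false)) sh)
    (PySem.Dict.empty : PySem.Dict (Int × Int) (List Int))
  shared.items.map (fun q => (q.1.1, q.1.2, q.2))

-- ===== PORT B =====
-- transliteration of B: initialise every pair with [], build the inverted index
-- (index.setdefault(v, []).append(k) is exactly `modify v [] (· ++ [k])`), then walk the
-- elements in increasing order appending each to every pair of owners
-- (shared[(i, j)].append(e) is `modify (i, j) [] (· ++ [e])`; the key is always present).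
def build_shared_pairs_alt (decagons : List (Int × List Int)) : List (Int × Int × List Int) :=
  let d := PySem.Dict.ofList decagons
  let keys := PySem.List.sorted d.keys (fun x => x) false
  let shared0 := (PySem.List.enumerate keys).foldl
    (fun sh p => (PySem.List.slice keys (some (p.1 + 1)) none).foldl
      (fun sh j => sh.insert (p.2, j) ([] : List Int)) sh)
    (PySem.Dict.empty : PySem.Dict (Int × Int) (List Int))
  let index := d.items.foldl
    (fun ix p => (PySem.Set.ofList p.2).foldl (fun ix v => ix.modify v [] (fun x => x ++ [p.1])) ix)
    (PySem.Dict.empty : PySem.Dict Int (List Int))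
  let shared := (PySem.List.sorted index.keys (fun x => x) false).foldl
    (fun sh e =>
      let ks := PySem.List.sorted (index.getD e []) (fun x => x) false
      (PySem.List.enumerate ks).foldl
        (fun sh p => (PySem.List.slice ks (some (p.1 + 1)) none).foldl
          (fun sh j => sh.modify (p.2, j) [] (fun x => x ++ [e])) sh) sh)
    shared0
  shared.items.map (fun q => (q.1.1, q.1.2, q.2))

-- ===== PRECONDITION & SPEC =====
def Spec_build_shared_pairs (decagons : List (Int × List Int)) (out : List (Int × Int × List Int)) : Prop := out = build_shared_pairs_alt decagons
instance (decagons : List (Int × List Int)) (out : List (Int × Int × List Int)) : Decidable (Spec_build_shared_pairs decagons out) := by unfold Spec_build_shared_pairs; infer_instance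

-- ===== CLAIM (what is proved, stated in full; the proofs are below) =====
def Claim_equal_build_shared_pairs : Prop := ∀ (decagons : List (Int × List Int)), Dom_build_shared_pairs decagons → Spec_build_shared_pairs decagons (build_shared_pairs decagons)

-- ===== LEMMAS AND PROOFS =====

/-- all ordered pairs (earlier element, later element) of a list -/
def pairsOf : List Int → List (Int × Int)
  | [] => []
  | x :: xs => xs.map (fun j => (x, j)) ++ pairsOf xs

lemma mem_pairsOf_mem {l : List Int} {i j : Int} (h : (i, j) ∈ pairsOf l) : i ∈ l ∧ j ∈ l := by
  induction l with
  | nil => simp [pairsOf] at h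
  | cons x xs ih =>
    simp only [pairsOf, List.mem_append, List.mem_map, Prod.mk.injEq] at h
    rcases h with ⟨j', hj', hx, hj⟩ | h
    · subst hx; subst hj; exact ⟨List.mem_cons_self, List.mem_cons_of_mem _ hj'⟩
    · obtain ⟨hi, hj⟩ := ih h
      exact ⟨List.mem_cons_of_mem _ hi, List.mem_cons_of_mem _ hj⟩

lemma mem_pairsOf_iff {l : List Int} (hl : l.Pairwise (· < ·)) (i j : Int) :
    (i, j) ∈ pairsOf l ↔ i ∈ l ∧ j ∈ l ∧ i < j := by
  induction l with
  | nil => simp [pairsOf]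
  | cons x xs ih =>
    obtain ⟨hx, hxs⟩ := List.pairwise_cons.mp hl
    constructor
    · intro h
      simp only [pairsOf, List.mem_append, List.mem_map, Prod.mk.injEq] at h
      rcases h with ⟨j', hj', hxi, hjj⟩ | h
      · subst hxi; subst hjj
        exact ⟨List.mem_cons_self, List.mem_cons_of_mem _ hj', hx _ hj'⟩
      · obtain ⟨hi, hj, hij⟩ := (ih hxs).mp h
        exact ⟨List.mem_cons_of_mem _ hi, List.mem_cons_of_mem _ hj, hij⟩
    · rintro ⟨hi, hj, hij⟩
      simp only [pairsOf, List.mem_append, List.mem_map, Prod.mk.injEq]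
      rcases List.mem_cons.mp hi with rfl | hi'
      · rcases List.mem_cons.mp hj with rfl | hj'
        · exact absurd hij (lt_irrefl _)
        · exact Or.inl ⟨j, hj', rfl, rfl⟩
      · rcases List.mem_cons.mp hj with rfl | hj'
        · exact absurd (lt_trans (hx _ hi') hij) (lt_irrefl _)
        · exact Or.inr ((ih hxs).mpr ⟨hi', hj', hij⟩)

lemma nodup_pairsOf {l : List Int} (hl : l.Pairwise (· < ·)) : (pairsOf l).Nodup := by
  induction l with
  | nil => simp [pairsOf]
  | cons x xs ih =>
    obtain ⟨hx, hxs⟩ := List.pairwise_cons.mp hl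
    refine List.Nodup.append ?_ (ih hxs) ?_
    · exact (hxs.imp (fun h => ne_of_lt h)).map (fun j => (x, j))
        (fun a b hne hc => hne (congrArg Prod.snd hc))
    · intro p hp1 hp2
      obtain ⟨j', _, rfl⟩ := List.mem_map.mp hp1
      exact absurd (hx _ (mem_pairsOf_mem hp2).1) (lt_irrefl x)

lemma sorted_pairwise_lt (xs : List Int) (h : xs.Nodup) :
    (PySem.List.sorted xs (fun x => x) false).Pairwise (· < ·) := by
  have h1 := PySem.List.sorted_pairwise xs (fun x => x)
  have h2 : (PySem.List.sorted xs (fun x => x) false).Nodup :=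
    (PySem.List.sorted_perm xs (fun x => x) false).nodup_iff.mpr h
  exact (h1.and h2).imp (fun hab => lt_of_le_of_ne hab.1 hab.2)

/-- the double loop `for idx_i, i in enumerate(keys): for j in keys[idx_i+1:]` is a fold over `pairsOf keys` -/
lemma foldl_enum_slice {D : Type} (g : D → Int → Int → D) (full : List Int) :
    ∀ (rest pre : List Int), pre ++ rest = full → ∀ (sh : D),
      (PySem.List.enumerate rest (pre.length : Int)).foldl
        (fun sh p => (PySem.List.slice full (some (p.1 + 1)) none).foldl (fun sh j => g sh p.2 j) sh) sh
      = (pairsOf rest).foldl (fun sh q => g sh q.1 q.2) sh := by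
  intro rest
  induction rest with
  | nil => intro pre h sh; simp [PySem.List.enumerate, pairsOf]
  | cons x xs ih =>
    intro pre h sh
    simp only [PySem.List.enumerate_cons, List.foldl_cons]
    have hslice : PySem.List.slice full (some ((pre.length : Int) + 1)) none = xs := by
      have hc : ((pre.length : Int) + 1) = (((pre ++ [x]).length : Nat) : Int) := by
        simp
      rw [hc, PySem.List.slice_from_natCast, ← h]
      have : pre ++ x :: xs = (pre ++ [x]) ++ xs := by simp
      rw [this, List.drop_left]
    rw [hslice]
    have hcast : (pre.length : Int) + 1 = (((pre ++ [x]).length : Nat) : Int) := by simp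
    rw [hcast, ih (pre ++ [x]) (by simpa using h)]
    simp only [pairsOf, List.foldl_append, List.foldl_map]

/-- the pair double-loop inserting fresh pair keys builds exactly the lexicographic pair list -/
lemma items_pairfold (keys : List Int) (hk : keys.Pairwise (· < ·)) (f : Int → Int → List Int) :
    ((PySem.List.enumerate keys).foldl
      (fun sh p => (PySem.List.slice keys (some (p.1 + 1)) none).foldl
        (fun sh j => sh.insert (p.2, j) (f p.2 j)) sh)
      (PySem.Dict.empty : PySem.Dict (Int × Int) (List Int))).items
    = (pairsOf keys).map (fun q => (q, f q.1 q.2)) := by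
  have h1 := foldl_enum_slice (fun sh i j => PySem.Dict.insert sh (i, j) (f i j)) keys keys [] rfl
    (PySem.Dict.empty : PySem.Dict (Int × Int) (List Int))
  have h2 := PySem.Dict.items_foldl_insert_fresh (pairsOf keys) (fun q => q)
    (fun q => f q.1 q.2) (PySem.Dict.empty : PySem.Dict (Int × Int) (List Int))
    (fun a _ => PySem.Dict.contains_empty a) (by simpa using nodup_pairsOf hk)
  have h3 : (PySem.Dict.empty : PySem.Dict (Int × Int) (List Int)).items = [] := rfl
  exact (congrArg PySem.Dict.items h1).trans (h2.trans (by rw [h3, List.nil_append]))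

lemma filter_eq_singleton_of_nodup {l : List (Int × Int)} (h : l.Nodup) (q : Int × Int) :
    l.filter (fun x => x == q) = if q ∈ l then [q] else [] := by
  induction l with
  | nil => simp
  | cons a as ih =>
    simp only [List.nodup_cons] at h
    by_cases ha : a = q
    · subst ha
      simp [h.1, ih h.2]
    · simp [ha, ih h.2, Ne.symm ha]

/-- flattening the per-element append events and filtering on one pair key -/
lemma events_filter (elems : List Int) (F : Int → List (Int × Int)) (hF : ∀ e, (F e).Nodup) (q : Int × Int) :
    ((elems.flatMap (fun e => (F e).map (fun q' => (q', e)))).filter (fun ev => ev.1 == q)).map (fun ev => ev.2)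
    = elems.filter (fun e => decide (q ∈ F e)) := by
  induction elems with
  | nil => rfl
  | cons e es ih =>
    have hpiece : (((F e).map (fun q' => (q', e))).filter (fun ev => ev.1 == q)).map (fun ev => ev.2)
        = if q ∈ F e then [e] else [] := by
      rw [List.filter_map]
      have hc : ((fun ev : (Int × Int) × Int => ev.1 == q) ∘ (fun q' => (q', e))) = (fun q' => q' == q) := rfl
      rw [hc, filter_eq_singleton_of_nodup (hF e) q]
      by_cases hq : q ∈ F e <;> simp [hq]
    simp only [List.flatMap_cons, List.filter_append, List.map_append, hpiece, ih, List.filter_cons]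
    by_cases hq : q ∈ F e <;> simp [hq]

lemma eq_of_nodup_fst {l : List (Int × List Int)} (h : (l.map (fun p => p.1)).Nodup)
    {p q : Int × List Int} (hp : p ∈ l) (hq : q ∈ l) (hfst : p.1 = q.1) : p = q := by
  induction l with
  | nil => cases hp
  | cons a as ih =>
    simp only [List.map_cons, List.nodup_cons] at h
    rcases List.mem_cons.mp hp with rfl | hp' <;> rcases List.mem_cons.mp hq with rfl | hq'
    · rfl
    · exact absurd (hfst ▸ List.mem_map_of_mem hq') h.1
    · exact absurd (hfst ▸ List.mem_map_of_mem hp') h.1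
    · exact ih h.2 hp' hq'

-- proof-side names for the shared subterms of the two ports (definitionally equal to them)
def pvD (decagons : List (Int × List Int)) : PySem.Dict Int (List Int) := PySem.Dict.ofList decagons

def pvKeys (decagons : List (Int × List Int)) : List Int :=
  PySem.List.sorted (pvD decagons).keys (fun x => x) false

def pvSets (decagons : List (Int × List Int)) : PySem.Dict Int (PySem.Set Int) :=
  (pvD decagons).items.foldl (fun s p => s.insert p.1 (PySem.Set.ofList p.2)) PySem.Dict.empty

def pvValA (decagons : List (Int × List Int)) (i j : Int) : List Int :=
  PySem.List.sorted (PySem.Set.inter ((pvSets decagons).getD i []) ((pvSets decagons).getD j [])) (fun x => x) false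

def pvIdx (decagons : List (Int × List Int)) : PySem.Dict Int (List Int) :=
  (pvD decagons).items.foldl
    (fun ix p => (PySem.Set.ofList p.2).foldl (fun ix v => ix.modify v [] (fun x => x ++ [p.1])) ix)
    PySem.Dict.empty

def pvElems (decagons : List (Int × List Int)) : List Int :=
  PySem.List.sorted (pvIdx decagons).keys (fun x => x) false

def pvKs (decagons : List (Int × List Int)) (e : Int) : List Int :=
  PySem.List.sorted ((pvIdx decagons).getD e []) (fun x => x) false

def pvEvents (decagons : List (Int × List Int)) : List ((Int × Int) × Int) :=
  (pvElems decagons).flatMap (fun e => (pairsOf (pvKs decagons e)).map (fun q => (q, e)))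

lemma dkeys_nodup (dec : List (Int × List Int)) : (pvD dec).keys.Nodup :=
  PySem.Dict.nodup_keys_ofList dec

lemma dkeys_eq (dec : List (Int × List Int)) : (pvD dec).keys = (pvD dec).items.map (fun p => p.1) := rfl

lemma keys_lt (dec : List (Int × List Int)) : (pvKeys dec).Pairwise (· < ·) :=
  sorted_pairwise_lt _ (dkeys_nodup dec)

lemma mem_keys (dec : List (Int × List Int)) (i : Int) :
    i ∈ pvKeys dec ↔ ∃ p ∈ (pvD dec).items, p.1 = i := by
  rw [pvKeys, PySem.List.mem_sorted, dkeys_eq, List.mem_map]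

lemma idx_flat (dec : List (Int × List Int)) :
    pvIdx dec = ((pvD dec).items.flatMap (fun p => (PySem.Set.ofList p.2).map (fun v => (v, p.1)))).foldl
      (fun d p => d.modify p.1 [] (fun x => x ++ [p.2])) PySem.Dict.empty := by
  rw [List.foldl_flatMap]
  exact congrFun (congrFun (congrArg List.foldl (funext fun ix => funext fun p =>
    (List.foldl_map (f := fun v : Int => (v, p.1))
      (g := fun d (p' : Int × Int) => d.modify p'.1 [] (fun x => x ++ [p'.2]))
      (l := PySem.Set.ofList p.2) (init := ix)).symm)) PySem.Dict.empty) (pvD dec).items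

lemma flat_filter_fst (items : List (Int × List Int)) (e : Int) :
    ((items.flatMap (fun p => (PySem.Set.ofList p.2).map (fun v => (v, p.1)))).filter
        (fun q => q.1 == e)).map (fun q => q.2)
    = (items.filter (fun p => decide (e ∈ p.2))).map (fun p => p.1) := by
  induction items with
  | nil => rfl
  | cons p ps ih =>
    have hpiece : (((PySem.Set.ofList p.2).map (fun v => (v, p.1))).filter (fun q => q.1 == e)).map (fun q => q.2)
        = if e ∈ p.2 then [p.1] else [] := by
      rw [List.filter_map]
      have hc : ((fun q : Int × Int => q.1 == e) ∘ (fun v => (v, p.1))) = (fun v => v == e) := rfl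
      rw [hc, List.filter_beq, List.map_map]
      by_cases he : e ∈ p.2
      · have h1 : List.count e (PySem.Set.ofList p.2) = 1 :=
          List.count_eq_one_of_mem (PySem.Set.nodup_ofList p.2) ((PySem.Set.mem_ofList p.2 e).mpr he)
        rw [h1]
        simp [he]
      · have h0 : List.count e (PySem.Set.ofList p.2) = 0 :=
          List.count_eq_zero.mpr (fun hm => he ((PySem.Set.mem_ofList p.2 e).mp hm))
        simp [h0, he]
    simp only [List.flatMap_cons, List.filter_append, List.map_append, hpiece, ih, List.filter_cons]
    by_cases he : e ∈ p.2 <;> simp [he]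

lemma idx_getD (dec : List (Int × List Int)) (e : Int) :
    (pvIdx dec).getD e [] = ((pvD dec).items.filter (fun p => decide (e ∈ p.2))).map (fun p => p.1) := by
  rw [idx_flat]
  rw [PySem.Dict.getD_foldl_modify_append]
  rw [PySem.Dict.getD_empty, List.nil_append]
  exact flat_filter_fst _ e

lemma idx_keys_eq (dec : List (Int × List Int)) :
    (pvIdx dec).keys = PySem.Set.ofList
      (((pvD dec).items.flatMap (fun p => (PySem.Set.ofList p.2).map (fun v => (v, p.1)))).map (fun q => q.1)) := by
  rw [idx_flat]
  have h := PySem.Dict.keys_foldl_modify_key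
    ((pvD dec).items.flatMap (fun p => (PySem.Set.ofList p.2).map (fun v => (v, p.1))))
    (fun q => q.1) [] (fun _ q => (fun x => x ++ [q.2]))
    (PySem.Dict.empty : PySem.Dict Int (List Int))
  exact h.trans (by rw [PySem.Dict.keys_empty, PySem.Set.update_nil_left])

lemma idx_keys_nodup (dec : List (Int × List Int)) : (pvIdx dec).keys.Nodup := by
  rw [idx_keys_eq]; exact PySem.Set.nodup_ofList _

lemma mem_elems (dec : List (Int × List Int)) (e : Int) :
    e ∈ pvElems dec ↔ ∃ p ∈ (pvD dec).items, e ∈ p.2 := by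
  rw [pvElems, PySem.List.mem_sorted, idx_keys_eq]
  rw [PySem.Set.mem_ofList]
  simp only [List.mem_map, List.mem_flatMap, PySem.Set.mem_ofList]
  constructor
  · rintro ⟨q, ⟨p, hp, v, hv, rfl⟩, rfl⟩
    exact ⟨p, hp, hv⟩
  · rintro ⟨p, hp, he⟩
    exact ⟨(e, p.1), ⟨p, hp, e, he, rfl⟩, rfl⟩

lemma elems_lt (dec : List (Int × List Int)) : (pvElems dec).Pairwise (· < ·) :=
  sorted_pairwise_lt _ (idx_keys_nodup dec)

lemma idx_getD_nodup (dec : List (Int × List Int)) (e : Int) : ((pvIdx dec).getD e []).Nodup := by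
  rw [idx_getD]
  have hnd : ((pvD dec).items.map (fun p => p.1)).Nodup := by
    rw [← dkeys_eq]; exact dkeys_nodup dec
  exact hnd.sublist (List.filter_sublist.map (fun p : Int × List Int => p.1))

lemma ks_lt (dec : List (Int × List Int)) (e : Int) : (pvKs dec e).Pairwise (· < ·) :=
  sorted_pairwise_lt _ (idx_getD_nodup dec e)

lemma mem_ks (dec : List (Int × List Int)) (e i : Int) :
    i ∈ pvKs dec e ↔ ∃ p ∈ (pvD dec).items, p.1 = i ∧ e ∈ p.2 := by
  rw [pvKs, PySem.List.mem_sorted, idx_getD]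
  simp only [List.mem_map, List.mem_filter, decide_eq_true_eq]
  constructor
  · rintro ⟨p, ⟨hp, he⟩, rfl⟩; exact ⟨p, hp, rfl, he⟩
  · rintro ⟨p, hp, rfl, he⟩; exact ⟨p, ⟨hp, he⟩, rfl⟩

lemma mem_ks' (dec : List (Int × List Int)) {e i : Int} {vi : List Int}
    (hvi : (i, vi) ∈ (pvD dec).items) : i ∈ pvKs dec e ↔ e ∈ vi := by
  rw [mem_ks]
  constructor
  · rintro ⟨p, hp, hp1, he⟩
    have : p = (i, vi) := eq_of_nodup_fst (by rw [← dkeys_eq]; exact dkeys_nodup dec) hp hvi hp1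
    subst this; exact he
  · intro he; exact ⟨(i, vi), hvi, rfl, he⟩

lemma sets_items (dec : List (Int × List Int)) :
    (pvSets dec).items = (pvD dec).items.map (fun p => (p.1, PySem.Set.ofList p.2)) := by
  have h := PySem.Dict.items_foldl_insert_fresh (pvD dec).items (fun p => p.1)
    (fun p => PySem.Set.ofList p.2) (PySem.Dict.empty : PySem.Dict Int (PySem.Set Int))
    (fun a _ => PySem.Dict.contains_empty _) (by rw [← dkeys_eq]; exact dkeys_nodup dec)
  exact h.trans (by rw [show (PySem.Dict.empty : PySem.Dict Int (PySem.Set Int)).items = [] from rfl, List.nil_append])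

lemma sets_keys_nodup (dec : List (Int × List Int)) : (pvSets dec).keys.Nodup := by
  have h : (pvSets dec).keys = (pvD dec).items.map (fun p => p.1) := by
    show (pvSets dec).items.map (fun p => p.1) = _
    rw [sets_items, List.map_map]
    rfl
  rw [h, ← dkeys_eq]; exact dkeys_nodup dec

lemma sets_getD (dec : List (Int × List Int)) {i : Int} {vi : List Int}
    (hvi : (i, vi) ∈ (pvD dec).items) : (pvSets dec).getD i [] = PySem.Set.ofList vi := by
  refine PySem.Dict.getD_of_mem_items _ ?_ (sets_keys_nodup dec) []
  rw [sets_items]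
  exact List.mem_map_of_mem hvi

/-- crux: for each admissible pair, the inverted-index accumulation equals the sorted intersection -/
lemma crux (dec : List (Int × List Int)) {i j : Int} (hq : (i, j) ∈ pairsOf (pvKeys dec)) :
    pvValA dec i j = ((pvEvents dec).filter (fun ev => ev.1 == (i, j))).map (fun ev => ev.2) := by
  obtain ⟨hik, hjk, hij⟩ := (mem_pairsOf_iff (keys_lt dec) i j).mp hq
  obtain ⟨pi, hpi, hpi1⟩ := (mem_keys dec i).mp hik
  obtain ⟨pj, hpj, hpj1⟩ := (mem_keys dec j).mp hjk
  have hvi : (i, pi.2) ∈ (pvD dec).items := by rw [← hpi1]; exact hpi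
  have hvj : (j, pj.2) ∈ (pvD dec).items := by rw [← hpj1]; exact hpj
  rw [pvEvents, events_filter _ _ (fun e => nodup_pairsOf (ks_lt dec e))]
  rw [pvValA, sets_getD dec hvi, sets_getD dec hvj]
  apply PySem.List.sorted_eq_of_perm_of_pairwise_lt
  · rw [List.perm_ext_iff_of_nodup
      (((elems_lt dec).imp (fun h => ne_of_lt h)).filter _)
      (PySem.Set.nodup_inter _ _ (PySem.Set.nodup_ofList pi.2))]
    intro e
    simp only [List.mem_filter, decide_eq_true_eq, PySem.Set.mem_inter, PySem.Set.mem_ofList]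
    constructor
    · rintro ⟨_, hpair⟩
      obtain ⟨hi', hj', _⟩ := (mem_pairsOf_iff (ks_lt dec e) i j).mp hpair
      exact ⟨(mem_ks' dec hvi).mp hi', (mem_ks' dec hvj).mp hj'⟩
    · rintro ⟨hei, hej⟩
      refine ⟨(mem_elems dec e).mpr ⟨(i, pi.2), hvi, hei⟩, ?_⟩
      exact (mem_pairsOf_iff (ks_lt dec e) i j).mpr
        ⟨(mem_ks' dec hvi).mpr hei, (mem_ks' dec hvj).mpr hej, hij⟩
  · exact (elems_lt dec).filter _

/-- the modify-only second phase of B, characterised on items -/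
lemma modify_items (d : PySem.Dict (Int × Int) (List Int)) (events : List ((Int × Int) × Int))
    (hnd : d.keys.Nodup) (hall : ∀ ev ∈ events, ev.1 ∈ d.keys) :
    (events.foldl (fun sh ev => sh.modify ev.1 [] (fun x => x ++ [ev.2])) d).items
    = d.keys.map (fun q => (q, d.getD q [] ++ (events.filter (fun ev => ev.1 == q)).map (fun ev => ev.2))) := by
  have hkeys : (events.foldl (fun sh ev => sh.modify ev.1 [] (fun x => x ++ [ev.2])) d).keys = d.keys := by
    have h1 := PySem.Dict.keys_foldl_modify_key events (fun ev => ev.1) []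
      (fun _ ev => (fun x => x ++ [ev.2])) d
    rw [PySem.Set.update_eq_append_filter] at h1
    have h2 : List.filter (fun y => !PySem.Set.contains d.keys y)
        (PySem.Set.ofList (events.map (fun ev => ev.1))) = [] := by
      rw [List.filter_eq_nil_iff]
      intro a ha
      have ha' : a ∈ d.keys := by
        obtain ⟨ev, hev, rfl⟩ := List.mem_map.mp ((PySem.Set.mem_ofList _ a).mp ha)
        exact hall ev hev
      simpa using ha'
    rw [h2, List.append_nil] at h1
    exact h1
  rw [PySem.Dict.items_eq_map_keys _ (hkeys.symm ▸ hnd) [], hkeys]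
  refine List.map_congr_left (fun q _ => ?_)
  have hg := PySem.Dict.getD_foldl_modify_append events d q
  exact congrArg (fun v => (q, v)) hg

lemma A_items (dec : List (Int × List Int)) :
    build_shared_pairs dec
    = ((pairsOf (pvKeys dec)).map (fun q => (q, pvValA dec q.1 q.2))).map (fun q => (q.1.1, q.1.2, q.2)) := by
  exact congrArg (List.map (fun q => (q.1.1, q.1.2, q.2)))
    (items_pairfold (pvKeys dec) (keys_lt dec) (pvValA dec))

lemma B_items (dec : List (Int × List Int)) :
    build_shared_pairs_alt dec
    = ((pairsOf (pvKeys dec)).map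
        (fun q => (q, ((pvEvents dec).filter (fun ev => ev.1 == q)).map (fun ev => ev.2)))).map
      (fun q => (q.1.1, q.1.2, q.2)) := by
  -- first phase: shared0.items
  have h0 : ((PySem.List.enumerate (pvKeys dec)).foldl
      (fun sh p => (PySem.List.slice (pvKeys dec) (some (p.1 + 1)) none).foldl
        (fun sh j => sh.insert (p.2, j) ([] : List Int)) sh)
      (PySem.Dict.empty : PySem.Dict (Int × Int) (List Int))).items
      = (pairsOf (pvKeys dec)).map (fun q => (q, ([] : List Int))) :=
    items_pairfold (pvKeys dec) (keys_lt dec) (fun _ _ => [])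
  set sh0 := (PySem.List.enumerate (pvKeys dec)).foldl
      (fun sh p => (PySem.List.slice (pvKeys dec) (some (p.1 + 1)) none).foldl
        (fun sh j => sh.insert (p.2, j) ([] : List Int)) sh)
      (PySem.Dict.empty : PySem.Dict (Int × Int) (List Int)) with hsh0
  have hkeys0 : sh0.keys = pairsOf (pvKeys dec) := by
    show sh0.items.map (fun p => p.1) = _
    rw [h0, List.map_map]
    exact List.map_id' _
  have hnd0 : sh0.keys.Nodup := by rw [hkeys0]; exact nodup_pairsOf (keys_lt dec)
  -- second phase equals a fold over the flattened events
  have hphase2 : (pvElems dec).foldl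
      (fun sh e =>
        (PySem.List.enumerate (pvKs dec e)).foldl
          (fun sh p => (PySem.List.slice (pvKs dec e) (some (p.1 + 1)) none).foldl
            (fun sh j => sh.modify (p.2, j) [] (fun x => x ++ [e])) sh) sh) sh0
      = (pvEvents dec).foldl (fun sh ev => sh.modify ev.1 [] (fun x => x ++ [ev.2])) sh0 := by
    rw [pvEvents, List.foldl_flatMap]
    refine congrFun (congrFun (congrArg List.foldl (funext fun sh => funext fun e => ?_)) sh0) (pvElems dec)
    exact (foldl_enum_slice (fun sh i j => PySem.Dict.modify sh (i, j) [] (fun x => x ++ [e]))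
      (pvKs dec e) (pvKs dec e) [] rfl sh).trans
      (List.foldl_map (f := fun q : Int × Int => (q, e))
        (g := fun sh (ev : (Int × Int) × Int) => PySem.Dict.modify sh ev.1 [] (fun x => x ++ [ev.2]))
        (l := pairsOf (pvKs dec e)) (init := sh)).symm
  have hall : ∀ ev ∈ pvEvents dec, ev.1 ∈ sh0.keys := by
    intro ev hev
    rw [hkeys0]
    obtain ⟨e, _, hq⟩ := List.mem_flatMap.mp hev
    obtain ⟨q, hqmem, rfl⟩ := List.mem_map.mp hq
    obtain ⟨i, j⟩ := q
    obtain ⟨hi, hj, hij⟩ := (mem_pairsOf_iff (ks_lt dec e) i j).mp hqmem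
    refine (mem_pairsOf_iff (keys_lt dec) i j).mpr ⟨?_, ?_, hij⟩
    · obtain ⟨p, hp, hp1, _⟩ := (mem_ks dec e i).mp hi
      exact (mem_keys dec i).mpr ⟨p, hp, hp1⟩
    · obtain ⟨p, hp, hp1, _⟩ := (mem_ks dec e j).mp hj
      exact (mem_keys dec j).mpr ⟨p, hp, hp1⟩
  have hitems := modify_items sh0 (pvEvents dec) hnd0 hall
  rw [hkeys0] at hitems
  have hvals : (pairsOf (pvKeys dec)).map
        (fun q => (q, sh0.getD q [] ++ ((pvEvents dec).filter (fun ev => ev.1 == q)).map (fun ev => ev.2)))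
      = (pairsOf (pvKeys dec)).map
        (fun q => (q, ((pvEvents dec).filter (fun ev => ev.1 == q)).map (fun ev => ev.2))) := by
    refine List.map_congr_left (fun q hqmem => ?_)
    have hget : sh0.getD q [] = [] := by
      refine PySem.Dict.getD_of_mem_items sh0 ?_ hnd0 []
      rw [h0]
      exact List.mem_map.mpr ⟨q, hqmem, rfl⟩
    rw [hget, List.nil_append]
  exact congrArg (List.map (fun q => (q.1.1, q.1.2, q.2)))
    ((congrArg PySem.Dict.items hphase2).trans (hitems.trans hvals))

lemma ports_eq (dec : List (Int × List Int)) :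
    build_shared_pairs dec = build_shared_pairs_alt dec := by
  rw [A_items, B_items]
  refine congrArg (List.map (fun q : (Int × Int) × List Int => (q.1.1, q.1.2, q.2))) ?_
  refine List.map_congr_left (fun q hq => ?_)
  obtain ⟨i, j⟩ := q
  exact congrArg (fun v => (((i, j) : Int × Int), v)) (crux dec hq)

-- ===== VERDICT (by name: the statement is the Claim_ definition above) =====
theorem build_shared_pairs_spec : Claim_equal_build_shared_pairs := by
  intro decagons _hdom
  unfold Spec_build_shared_pairs
  exact ports_eq decagons
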